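-- pv_equiv track=rewrite | github.com/ChenAnZong/AndroidRPA | CPython-android/runtime/action_parser.py | _trim_action_tail
-- ===== SOURCE A (Python) =====
-- def _trim_action_tail(action: str) -> str:
--     """修剪 action 代码末尾的多余文字（模型可能在 action 后面追加解释）"""
--     # 找到最后一个匹配的右括号
--     depth = 0
--     for i, ch in enumerate(action):
--         if ch == '(':
--             depth += 1
--         elif ch == ')':
--             depth -= 1
--             if depth == 0:
--                 return action[:i + 1]
--     return action
-- ===== SOURCE B (Python) =====
-- def _trim_action_tail(action: str) -> str:
--     # Collect the positions of every ')' once, then test each candidate cut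
--     # point by comparing bracket counts of the prefix (no running depth).
--     closers = [i for i, ch in enumerate(action) if ch == ')']
--     for i in closers:
--         head = action[:i + 1]
--         if head.count('(') == head.count(')'):
--             return head
--     return action
-- ===== Notes on version B (the rewrite author's own statement) =====
-- stated objective: alternative
-- what changed: B drops A's running-depth accumulator entirely: it collects the positions of every ')' once, then tests each candidate cut point by comparing the '(' and ')' counts of the prefix up to it, returning the first prefix with equal counts.
import Mathlib
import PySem

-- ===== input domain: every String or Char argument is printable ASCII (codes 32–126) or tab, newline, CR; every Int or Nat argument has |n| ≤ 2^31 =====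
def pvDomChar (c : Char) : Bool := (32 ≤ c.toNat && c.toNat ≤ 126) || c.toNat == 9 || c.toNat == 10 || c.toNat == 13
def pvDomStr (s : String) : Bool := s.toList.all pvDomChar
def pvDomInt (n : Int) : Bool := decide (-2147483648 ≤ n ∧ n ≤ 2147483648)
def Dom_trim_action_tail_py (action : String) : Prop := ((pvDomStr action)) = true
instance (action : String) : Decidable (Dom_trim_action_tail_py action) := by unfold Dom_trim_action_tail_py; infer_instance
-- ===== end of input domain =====

-- B replaces A's single early-exit depth scan with a list of ')' positions and a
-- per-candidate bracket-count comparison (alternative decomposition, same results).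

-- ===== PORT A =====
-- A's scan: enumerate chars keeping depth; at a ')' that brings depth to 0
-- return action[:i+1]; loop exhausted = return action.
def trimAGo : List Char → Nat → Int → Option Nat
  | [], _, _ => none
  | c :: rest, i, depth =>
    if c = '(' then trimAGo rest (i + 1) (depth + 1)
    else if c = ')' then
      if depth - 1 = 0 then some i else trimAGo rest (i + 1) (depth - 1)
    else trimAGo rest (i + 1) depth

def trim_action_tail_py (action : String) : String :=
  match trimAGo action.toList 0 0 with
  | some i => String.ofList (action.toList.take (i + 1))  -- action[:i+1], i ≥ 0: exact
  | none => action

-- ===== PORT B =====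
-- Source B: closers = [i for i, ch in enumerate(action) if ch == ')'], then the first i
-- whose prefix action[:i+1] has equal '(' and ')' counts wins.
def trim_action_tail_py_alt (action : String) : String :=
  let cs := action.toList
  let closers := ((PySem.List.enumerate cs).filter (fun p => p.2 == ')')).map (·.1)
  match closers.find? (fun i =>
      (cs.take (i.toNat + 1)).count '(' == (cs.take (i.toNat + 1)).count ')') with
      -- head.count(c) for a 1-char c = List.count; i ≥ 0 so action[:i+1] = take (i.toNat+1): exact
  | some i => String.ofList (cs.take (i.toNat + 1))
  | none => action

-- ===== PRECONDITION & SPEC =====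
def Spec_trim_action_tail_py (action : String) (out : String) : Prop := out = trim_action_tail_py_alt action
instance (action : String) (out : String) : Decidable (Spec_trim_action_tail_py action out) := by unfold Spec_trim_action_tail_py; infer_instance

-- ===== CLAIM (what is proved, stated in full; the proofs are below) =====
def Claim_equal_trim_action_tail_py : Prop := ∀ (action : String), Dom_trim_action_tail_py action → Spec_trim_action_tail_py action (trim_action_tail_py action)

-- ===== LEMMAS AND PROOFS =====

-- Index-free form of A's scan (returns the offset within the remaining list).
def bGo : List Char → Int → Option Nat
  | [], _ => none
  | c :: rest, d =>
    if c = '(' then (bGo rest (d + 1)).map (· + 1)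
    else if c = ')' then
      if d - 1 = 0 then some 0 else (bGo rest (d - 1)).map (· + 1)
    else (bGo rest d).map (· + 1)

theorem trimAGo_eq_bGo (cs : List Char) (i : Nat) (d : Int) :
    trimAGo cs i d = (bGo cs d).map (fun j => i + j) := by
  induction cs generalizing i d with
  | nil => simp [trimAGo, bGo]
  | cons c rest ih =>
    simp only [trimAGo, bGo]
    split_ifs with h1 h2 h3 <;>
      simp [ih, Option.map_map, Function.comp_def, Nat.add_assoc, Nat.add_comm 1]

-- Bracket balance of a prefix.
def bal (l : List Char) : Int := (l.count '(' : Int) - (l.count ')' : Int)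

theorem bal_append_singleton (l : List Char) (c : Char) :
    bal (l ++ [c]) = bal l + ((if c = '(' then (1 : Int) else 0) - (if c = ')' then 1 else 0)) := by
  simp [bal, List.count_append, List.count_singleton]
  split_ifs with h1 h2 <;> simp_all <;> omega

-- B's search over the closers list equals bGo, generalized over a consumed prefix.
theorem closers_find_eq_bGo (cs : List Char) (pre : List Char) :
    ((((PySem.List.enumerate cs (pre.length : Int)).filter (fun p => p.2 == ')')).map (·.1)).find?
        (fun i => ((pre ++ cs).take (i.toNat + 1)).count '(' == ((pre ++ cs).take (i.toNat + 1)).count ')'))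
      = (bGo cs (bal pre)).map (fun j => ((pre.length + j : Nat) : Int)) := by
  induction cs generalizing pre with
  | nil => simp [PySem.List.enumerate_nil, bGo]
  | cons c rest ih =>
    have hpre : (pre ++ c :: rest) = (pre ++ [c]) ++ rest := by simp
    have hlen : ((pre ++ [c]).length : Int) = (pre.length : Int) + 1 := by simp
    have htake : ∀ (i : Nat), pre.length + i + 1 = (pre ++ [c]).length + i := by
      intro i; simp; omega
    rw [PySem.List.enumerate_cons]
    by_cases hc : c = ')'
    · subst hc
      simp only [List.filter_cons, show ((')' : Char) == ')') = true from rfl, if_true, List.map_cons, List.find?_cons]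
      have htoNat : ((pre.length : Int)).toNat = pre.length := by simp
      by_cases hz : bal pre - 1 = 0
      · have hcount : (((pre ++ ')' :: rest).take (pre.length + 1)).count '(' == ((pre ++ ')' :: rest).take (pre.length + 1)).count ')') = true := by
          have : (pre ++ ')' :: rest).take (pre.length + 1) = pre ++ [')'] := by
            rw [hpre, List.take_append_of_le_length (by simp)]
            simp
          rw [this]
          have h1 : (pre ++ [')']).count '(' = pre.count '(' := by simp
          have h2 : (pre ++ [')']).count ')' = pre.count ')' + 1 := by simp
          simp only [bal] at hz
          simp only [h1, h2, beq_iff_eq]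
          omega
        have hb0 : bGo (')' :: rest) (bal pre) = some 0 := by
          simp [bGo, hz]
        simp [htoNat, hcount, hb0]
      · have hcount : (((pre ++ ')' :: rest).take (pre.length + 1)).count '(' == ((pre ++ ')' :: rest).take (pre.length + 1)).count ')') = false := by
          have : (pre ++ ')' :: rest).take (pre.length + 1) = pre ++ [')'] := by
            rw [hpre, List.take_append_of_le_length (by simp)]
            simp
          rw [this]
          have h1 : (pre ++ [')']).count '(' = pre.count '(' := by simp
          have h2 : (pre ++ [')']).count ')' = pre.count ')' + 1 := by simp
          simp only [bal] at hz
          simp only [h1, h2, beq_eq_false_iff_ne, ne_eq]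
          omega
        simp only [htoNat, hcount, Bool.false_eq_true, if_false]
        have hrec := ih (pre ++ [')'])
        rw [hpre]
        rw [hlen] at hrec
        have hbal : bal (pre ++ [')']) = bal pre - 1 := by
          rw [bal_append_singleton]; simp; try omega
        rw [hbal] at hrec
        rw [hrec]
        have hb1 : bGo (')' :: rest) (bal pre) = (bGo rest (bal pre - 1)).map (· + 1) := by
          simp [bGo, hz]
          try omega
        rw [hb1]
        cases bGo rest (bal pre - 1) <;> simp <;> try omega
    · -- c is not ')': filtered out; recurse
      simp only [List.filter_cons, show (c == ')') = false from by simp [hc]]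
      simp only [Bool.false_eq_true, if_false]
      have hrec := ih (pre ++ [c])
      rw [hpre]
      rw [hlen] at hrec
      rw [hrec]
      have hbal : bal (pre ++ [c]) = bal pre + ((if c = '(' then (1:Int) else 0) - 0) := by
        rw [bal_append_singleton]; simp [hc]
      have : bGo (c :: rest) (bal pre) = (bGo rest (bal pre + ((if c = '(' then (1:Int) else 0) - 0))).map (· + 1) := by
        by_cases ho : c = '('
        · subst ho; simp [bGo]
        · simp [bGo, ho, hc]
      rw [this, ← hbal]
      cases bGo rest (bal (pre ++ [c])) <;> simp <;> try omega

-- ===== VERDICT (by name: the statement is the Claim_ definition above) =====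
theorem trim_action_tail_py_spec : Claim_equal_trim_action_tail_py := by
  intro action _
  unfold Spec_trim_action_tail_py trim_action_tail_py trim_action_tail_py_alt
  have h := closers_find_eq_bGo action.toList []
  simp only [List.nil_append, List.length_nil, Nat.cast_zero] at h
  have hb : bal ([] : List Char) = 0 := by simp [bal]
  rw [hb] at h
  simp only []
  rw [h, trimAGo_eq_bGo]
  cases hg : bGo action.toList 0 with
  | none => simp
  | some j => simp
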